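-- pv_equiv track=rewrite | github.com/saazalll/ATS-Resume-Screener | resume_builder.py | _format_experience
-- ===== SOURCE A (Python) =====
-- from typing import Dict, List
--
-- def _non_empty_lines(value: str) -> List[str]:
--     return [line.strip() for line in value.splitlines() if line.strip()]
--
-- def _format_experience(rows: List[Dict[str, str]]) -> str:
--     internships = []
--     simulations = []
--     others = []
--
--     for row in rows:
--         exp_type = str(row.get("Type", "")).strip().lower()
--         role = str(row.get("Role", "")).strip()
--         company = str(row.get("Company", "")).strip()
--         duration = str(row.get("Duration", "")).strip()
--         location = str(row.get("Location", "")).strip()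
--         achievements = str(row.get("Achievements", "")).strip()
--
--         if not any([exp_type, role, company, duration, location, achievements]):
--             continue
--
--         headline = " - ".join([x for x in [role, company] if x]) or "Experience"
--         meta = " | ".join([x for x in [duration, location] if x])
--         block = [f"### {headline}"]
--         if meta:
--             block.append(meta)
--         block.extend([f"- {a}" for a in _non_empty_lines(achievements)])
--         block.append("")
--
--         if "simulation" in exp_type:
--             simulations.extend(block)
--         elif "intern" in exp_type:
--             internships.extend(block)
--         else:
--             others.extend(block)
--
--     out = []
--     if internships:
--         out.extend(["#### Internships", *internships])
--     if simulations:
--         out.extend(["#### Job Simulations", *simulations])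
--     if others:
--         out.extend(["#### Other Experience", *others])
--
--     return "\n".join(out).strip()
-- ===== SOURCE B (Python) =====
-- _HEADERS = ("#### Internships", "#### Job Simulations", "#### Other Experience")
--
-- def _parse(row):
--     exp_type = str(row.get("Type", "")).strip().lower()
--     role = str(row.get("Role", "")).strip()
--     company = str(row.get("Company", "")).strip()
--     duration = str(row.get("Duration", "")).strip()
--     location = str(row.get("Location", "")).strip()
--     achievements = str(row.get("Achievements", "")).strip()
--     if not any([exp_type, role, company, duration, location, achievements]):
--         return None
--     if "simulation" in exp_type:
--         cat = 1
--     elif "intern" in exp_type: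
--         cat = 0
--     else:
--         cat = 2
--     headline = " - ".join([x for x in [role, company] if x]) or "Experience"
--     meta = " | ".join([x for x in [duration, location] if x])
--     lines = [f"- {line.strip()}" for line in achievements.splitlines() if line.strip()]
--     return (cat, [f"### {headline}"] + ([meta] if meta else []) + lines + [""])
--
-- def _format_experience(rows):
--     entries = [e for e in map(_parse, rows) if e is not None]
--     entries.sort(key=lambda e: e[0])  # stable: keeps input order inside each section
--     out = []
--     prev = None
--     for cat, block in entries:
--         if cat != prev:
--             out.append(_HEADERS[cat])
--             prev = cat
--         out.extend(block)
--     return "\n".join(out).strip()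
-- ===== Notes on version B (the rewrite author's own statement) =====
-- stated objective: alternative
-- what changed: A's single loop that interleaves classification with three growing per-section accumulators is replaced by parse-to-(category, block) entries, a stable sort by category, and one linear scan over the sorted entries that emits a section header whenever the category changes.
import Mathlib
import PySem

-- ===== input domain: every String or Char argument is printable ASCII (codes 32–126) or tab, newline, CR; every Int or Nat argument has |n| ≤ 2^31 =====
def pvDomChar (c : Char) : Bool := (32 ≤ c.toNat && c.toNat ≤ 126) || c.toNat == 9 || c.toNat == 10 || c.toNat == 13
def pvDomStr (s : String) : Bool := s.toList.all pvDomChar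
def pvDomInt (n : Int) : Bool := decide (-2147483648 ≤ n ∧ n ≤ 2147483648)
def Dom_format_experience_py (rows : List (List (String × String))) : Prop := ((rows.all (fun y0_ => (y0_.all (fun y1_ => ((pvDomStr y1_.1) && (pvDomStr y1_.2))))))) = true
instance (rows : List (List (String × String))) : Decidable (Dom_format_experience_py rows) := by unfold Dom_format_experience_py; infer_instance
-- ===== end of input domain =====

-- B replaces A's single loop with three growing per-section accumulators by a different algorithm:
-- parse rows to (category, block) entries, STABLE-sort the entries by category, then one linear
-- scan that emits a section header whenever the category changes (objective: alternative, same cost).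

-- ===== PORT A =====
-- row.get(k, "") on the dict row (first-match association-list lookup)
def pvGet (row : List (String × String)) (k : String) : String :=
  (PySem.Dict.mk row).getD k ""

-- _non_empty_lines: [line.strip() for line in value.splitlines() if line.strip()]
def pvNonEmptyLines (value : String) : List String :=
  ((PySem.Str.splitlines value).filter (fun line => !(PySem.Str.strip line == ""))).map
    (fun line => PySem.Str.strip line)

-- the body of A's 'for row in rows' loop, acting on the state (internships, simulations, others)
def pvBodyA (acc : List String × List String × List String) (row : List (String × String)) :
    List String × List String × List String :=
  let exp_type := PySem.Str.lower (PySem.Str.strip (pvGet row "Type"))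
  let role := PySem.Str.strip (pvGet row "Role")
  let company := PySem.Str.strip (pvGet row "Company")
  let duration := PySem.Str.strip (pvGet row "Duration")
  let location := PySem.Str.strip (pvGet row "Location")
  let achievements := PySem.Str.strip (pvGet row "Achievements")
  if !([exp_type, role, company, duration, location, achievements].any (fun s => !(s == ""))) then
    acc
  else
    let hj := PySem.Str.join " - " ([role, company].filter (fun x => !(x == "")))
    let headline := if hj == "" then "Experience" else hj
    let meta_ := PySem.Str.join " | " ([duration, location].filter (fun x => !(x == "")))
    let block := ["### " ++ headline]
    let block := if !(meta_ == "") then block ++ [meta_] else block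
    let block := block ++ (pvNonEmptyLines achievements).map (fun a => "- " ++ a)
    let block := block ++ [""]
    if PySem.Str.isIn "simulation" exp_type then (acc.1, acc.2.1 ++ block, acc.2.2)
    else if PySem.Str.isIn "intern" exp_type then (acc.1 ++ block, acc.2.1, acc.2.2)
    else (acc.1, acc.2.1, acc.2.2 ++ block)

def format_experience_py (rows : List (List (String × String))) : String :=
  let res := rows.foldl pvBodyA ([], [], [])
  let out : List String := []
  let out := if !(res.1 == []) then out ++ ["#### Internships"] ++ res.1 else out
  let out := if !(res.2.1 == []) then out ++ ["#### Job Simulations"] ++ res.2.1 else out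
  let out := if !(res.2.2 == []) then out ++ ["#### Other Experience"] ++ res.2.2 else out
  PySem.Str.strip (PySem.Str.join "\n" out)

-- ===== PORT B =====
-- _parse(row): None for an all-empty row, else (category, formatted block)
def pvEntry (row : List (String × String)) : Option (Nat × List String) :=
  let exp_type := PySem.Str.lower (PySem.Str.strip (pvGet row "Type"))
  let role := PySem.Str.strip (pvGet row "Role")
  let company := PySem.Str.strip (pvGet row "Company")
  let duration := PySem.Str.strip (pvGet row "Duration")
  let location := PySem.Str.strip (pvGet row "Location")
  let achievements := PySem.Str.strip (pvGet row "Achievements")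
  if !([exp_type, role, company, duration, location, achievements].any (fun s => !(s == ""))) then
    none
  else
    let cat : Nat :=
      if PySem.Str.isIn "simulation" exp_type then 1
      else if PySem.Str.isIn "intern" exp_type then 0
      else 2
    let hj := PySem.Str.join " - " ([role, company].filter (fun x => !(x == "")))
    let headline := if hj == "" then "Experience" else hj
    let meta_ := PySem.Str.join " | " ([duration, location].filter (fun x => !(x == "")))
    let lines := ((PySem.Str.splitlines achievements).filter (fun line => !(PySem.Str.strip line == ""))).map
      (fun line => "- " ++ PySem.Str.strip line)
    some (cat, ["### " ++ headline] ++ (if !(meta_ == "") then [meta_] else []) ++ lines ++ [""])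

-- _HEADERS[cat] (tuple index; cat is 0, 1 or 2 by construction, so getD is exact here)
def pvHeader (cat : Nat) : String :=
  ["#### Internships", "#### Job Simulations", "#### Other Experience"].getD cat ""

-- the body of B's scan loop over the sorted entries; state = (out, prev)
def pvScanStep (st : List String × Option Nat) (e : Nat × List String) :
    List String × Option Nat :=
  let st := if st.2 == some e.1 then st else (st.1 ++ [pvHeader e.1], some e.1)
  (st.1 ++ e.2, st.2)

def format_experience_py_alt (rows : List (List (String × String))) : String :=
  let entries := rows.filterMap pvEntry
  let entries := PySem.List.sorted entries (fun e => e.1)   -- entries.sort(key=...): stable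
  let res := entries.foldl pvScanStep ([], none)
  PySem.Str.strip (PySem.Str.join "\n" res.1)

-- ===== PRECONDITION & SPEC =====
def Spec_format_experience_py (rows : List (List (String × String))) (out : String) : Prop := out = format_experience_py_alt rows
instance (rows : List (List (String × String))) (out : String) : Decidable (Spec_format_experience_py rows out) := by unfold Spec_format_experience_py; infer_instance

-- ===== CLAIM (what is proved, stated in full; the proofs are below) =====
def Claim_equal_format_experience_py : Prop := ∀ (rows : List (List (String × String))), Dom_format_experience_py rows → Spec_format_experience_py rows (format_experience_py rows)

-- ===== LEMMAS AND PROOFS =====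
-- the blocks of category c, in input order, flattened (A's per-category accumulator)
def pvCblocks (c : Nat) (rows : List (List (String × String))) : List String :=
  ((((rows.filterMap pvEntry).filter (fun cb => cb.1 == c)).map (·.2))).flatten

lemma pvBodyA_eq (acc : List String × List String × List String) (row : List (String × String)) :
    pvBodyA acc row =
      match pvEntry row with
      | none => acc
      | some (c, b) =>
          (acc.1 ++ (if c == 0 then b else []),
           acc.2.1 ++ (if c == 1 then b else []),
           acc.2.2 ++ (if c == 2 then b else [])) := by
  unfold pvBodyA pvEntry
  dsimp only
  split_ifs <;> simp [pvNonEmptyLines, Function.comp]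

lemma pvLoopA (rows : List (List (String × String))) (I S O : List String) :
    rows.foldl pvBodyA (I, S, O) =
      (I ++ pvCblocks 0 rows, S ++ pvCblocks 1 rows, O ++ pvCblocks 2 rows) := by
  induction rows generalizing I S O with
  | nil => simp [pvCblocks]
  | cons r rs ih =>
    simp only [List.foldl_cons, pvBodyA_eq]
    cases h : pvEntry r with
    | none => simp [ih, pvCblocks, h]
    | some cb =>
      obtain ⟨c, b⟩ := cb
      simp only [ih, pvCblocks, List.filterMap_cons, h]
      by_cases h0 : c = 0 <;> by_cases h1 : c = 1 <;> by_cases h2 : c = 2 <;>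
        simp_all [List.append_assoc]

lemma pvEntry_block_ne_nil (row : List (String × String)) (c : Nat) (b : List String)
    (h : pvEntry row = some (c, b)) : b ≠ [] := by
  unfold pvEntry at h
  dsimp only at h
  split_ifs at h <;>
    simp only [Option.some.injEq, Prod.mk.injEq] at h <;>
    (obtain ⟨-, rfl⟩ := h; simp)

lemma pvEntry_cat_le (row : List (String × String)) (c : Nat) (b : List String)
    (h : pvEntry row = some (c, b)) : c ≤ 2 := by
  unfold pvEntry at h
  dsimp only at h
  split_ifs at h <;>
    simp only [Option.some.injEq, Prod.mk.injEq] at h <;>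
    (obtain ⟨rfl, -⟩ := h; omega)

lemma pvCblocks_nil_iff (c : Nat) (rows : List (List (String × String))) :
    pvCblocks c rows = [] ↔
      (rows.filterMap pvEntry).filter (fun cb => cb.1 == c) = [] := by
  simp only [pvCblocks, List.flatten_eq_nil_iff]
  constructor
  · intro h
    rcases hm : (rows.filterMap pvEntry).filter (fun cb => cb.1 == c) with _ | ⟨e, es⟩
    · exact hm
    · exfalso
      have he : e ∈ (rows.filterMap pvEntry).filter (fun cb => cb.1 == c) := by
        rw [hm]; exact List.mem_cons_self
      have hmem : e ∈ rows.filterMap pvEntry := List.mem_of_mem_filter he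
      obtain ⟨row, -, hrow⟩ := List.mem_filterMap.mp hmem
      exact pvEntry_block_ne_nil row e.1 e.2 (by simpa using hrow)
        (h e.2 (List.mem_map.mpr ⟨e, he, rfl⟩))
  · intro h b hb
    simp [h] at hb

lemma pvInsertBy_skip {α : Type} (before : α → α → Bool) (x : α) (as bs : List α)
    (h : ∀ y ∈ as, before x y = false) :
    PySem.List.insertBy before x (as ++ bs) = as ++ PySem.List.insertBy before x bs := by
  induction as with
  | nil => simp
  | cons a as ih =>
    have ha : before x a = false := h a List.mem_cons_self
    simp only [List.cons_append, PySem.List.insertBy, ha, Bool.false_eq_true, if_false]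
    exact congrArg (a :: ·) (ih (fun y hy => h y (List.mem_cons_of_mem _ hy)))

lemma pvInsertBy_front {α : Type} (before : α → α → Bool) (x : α) (l : List α)
    (h : ∀ y ∈ l, before x y = true) :
    PySem.List.insertBy before x l = x :: l := by
  cases l with
  | nil => rfl
  | cons a as => simp [PySem.List.insertBy, h a List.mem_cons_self]

-- a stable sort of a list whose keys are 0/1/2 IS the concatenation of the three filters
lemma pvSort3 (t : List (Nat × List String)) (h : ∀ e ∈ t, e.1 ≤ 2) :
    PySem.List.sorted t (fun e => e.1) =
      t.filter (fun e => e.1 == 0) ++ t.filter (fun e => e.1 == 1) ++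
        t.filter (fun e => e.1 == 2) := by
  rw [PySem.List.sorted_eq_foldl_insertBy]
  induction t using List.reverseRecOn with
  | nil => simp
  | append_singleton as x ih =>
    rw [List.foldl_append, ih (fun e he => h e (List.mem_append_left _ he))]
    simp only [List.foldl_cons, List.foldl_nil, List.filter_append]
    have key0 : ∀ (c : Nat) (y : Nat × List String),
        y ∈ as.filter (fun e => e.1 == c) → y.1 = c := by
      intro c y hy
      simpa using (List.mem_filter.mp hy).2
    obtain ⟨c, bx⟩ := x
    have hc : c ≤ 2 := h (c, bx) (List.mem_append_right _ List.mem_cons_self)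
    interval_cases c
    · rw [List.append_assoc,
        pvInsertBy_skip _ _ _ _ (fun y hy => by simp [key0 0 y hy]),
        pvInsertBy_front _ _ _ (fun y hy => by
          rcases List.mem_append.mp hy with hy | hy
          · simp [key0 1 y hy]
          · simp [key0 2 y hy])]
      simp
    · rw [show as.filter (fun e => e.1 == 0) ++ as.filter (fun e => e.1 == 1) ++
            as.filter (fun e => e.1 == 2) =
          (as.filter (fun e => e.1 == 0) ++ as.filter (fun e => e.1 == 1)) ++
            as.filter (fun e => e.1 == 2) from rfl,
        pvInsertBy_skip _ _ _ _ (fun y hy => by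
          rcases List.mem_append.mp hy with hy | hy
          · simp [key0 0 y hy]
          · simp [key0 1 y hy]),
        pvInsertBy_front _ _ _ (fun y hy => by simp [key0 2 y hy])]
      simp
    · rw [PySem.List.insertBy_of_forall_not_before _ _ _ (fun y hy => by
        rcases List.mem_append.mp hy with hy | hy
        · rcases List.mem_append.mp hy with hy | hy
          · simp [key0 0 y hy]
          · simp [key0 1 y hy]
        · simp [key0 2 y hy])]
      simp

lemma pvScan_same (c : Nat) (G : List (Nat × List String)) (h : ∀ e ∈ G, e.1 = c)
    (out : List String) :
    G.foldl pvScanStep (out, some c) = (out ++ (G.map (·.2)).flatten, some c) := by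
  induction G generalizing out with
  | nil => simp
  | cons e es ih =>
    have he : e.1 = c := h e List.mem_cons_self
    simp [pvScanStep, he, ih (fun y hy => h y (List.mem_cons_of_mem _ hy))]

lemma pvScan_group (c : Nat) (G : List (Nat × List String)) (h : ∀ e ∈ G, e.1 = c)
    (out : List String) (p : Option Nat) (hp : p ≠ some c) :
    G.foldl pvScanStep (out, p) =
      if G = [] then (out, p)
      else (out ++ pvHeader c :: (G.map (·.2)).flatten, some c) := by
  cases G with
  | nil => simp
  | cons e es =>
    have he : e.1 = c := h e List.mem_cons_self
    simp [pvScanStep, he, hp,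
      pvScan_same c es (fun y hy => h y (List.mem_cons_of_mem _ hy))]

-- ===== VERDICT (by name: the statement is the Claim_ definition above) =====
set_option maxHeartbeats 1000000 in
theorem format_experience_py_spec : Claim_equal_format_experience_py := by
  intro rows _
  unfold Spec_format_experience_py format_experience_py format_experience_py_alt
  dsimp only
  rw [pvLoopA]
  have ht : ∀ e ∈ rows.filterMap pvEntry, e.1 ≤ 2 := by
    intro e he
    obtain ⟨row, -, hrow⟩ := List.mem_filterMap.mp he
    exact pvEntry_cat_le row e.1 e.2 (by simpa using hrow)
  rw [pvSort3 _ ht, List.foldl_append, List.foldl_append]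
  have key0 : ∀ (c : Nat) (y : Nat × List String),
      y ∈ (rows.filterMap pvEntry).filter (fun e => e.1 == c) → y.1 = c := by
    intro c y hy
    simpa using (List.mem_filter.mp hy).2
  rw [pvScan_group 0 _ (key0 0) _ _ (by decide)]
  by_cases e0 : (rows.filterMap pvEntry).filter (fun e => e.1 == 0) = [] <;>
    [rw [if_pos e0]; rw [if_neg e0]] <;>
    rw [pvScan_group 1 _ (key0 1) _ _ (by decide)] <;>
    (by_cases e1 : (rows.filterMap pvEntry).filter (fun e => e.1 == 1) = [] <;>
      [rw [if_pos e1]; rw [if_neg e1]]) <;>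
    rw [pvScan_group 2 _ (key0 2) _ _ (by decide)] <;>
    (by_cases e2 : (rows.filterMap pvEntry).filter (fun e => e.1 == 2) = [] <;>
      [rw [if_pos e2]; rw [if_neg e2]]) <;>
    (first
      | (have f0 : (((rows.filterMap pvEntry).filter (fun cb => cb.1 == 0)).map (·.2)).flatten = [] :=
          (pvCblocks_nil_iff 0 rows).mpr e0) 
      | (have f0 : ¬ (((rows.filterMap pvEntry).filter (fun cb => cb.1 == 0)).map (·.2)).flatten = [] :=
          fun hf => e0 ((pvCblocks_nil_iff 0 rows).mp hf))) <;>
    (first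
      | (have f1 : (((rows.filterMap pvEntry).filter (fun cb => cb.1 == 1)).map (·.2)).flatten = [] :=
          (pvCblocks_nil_iff 1 rows).mpr e1)
      | (have f1 : ¬ (((rows.filterMap pvEntry).filter (fun cb => cb.1 == 1)).map (·.2)).flatten = [] :=
          fun hf => e1 ((pvCblocks_nil_iff 1 rows).mp hf))) <;>
    (first
      | (have f2 : (((rows.filterMap pvEntry).filter (fun cb => cb.1 == 2)).map (·.2)).flatten = [] :=
          (pvCblocks_nil_iff 2 rows).mpr e2)
      | (have f2 : ¬ (((rows.filterMap pvEntry).filter (fun cb => cb.1 == 2)).map (·.2)).flatten = [] :=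
          fun hf => e2 ((pvCblocks_nil_iff 2 rows).mp hf))) <;>
    simp [pvCblocks, pvHeader, f0, f1, f2]
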